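-- pv_equiv track=rewrite | github.com/maximilian-reinsel/vanity | dictionary_builder.py | get_syn_list_from_line
-- ===== SOURCE A (Python) =====
-- def get_syn_list_from_line(line):
--     to_ret = []
--     for w in line.strip(" -").split(";"):
--         w = w.strip()
--         if not w:
--             continue
--         idx = w.find(".")
--         if idx == -1:
--             to_ret.append(w.strip().upper())
--         else:
--             what_is_left =w[:idx].strip().upper()
--             if what_is_left:
--                 to_ret.append(what_is_left)
--             break
--     return to_ret
-- ===== SOURCE B (Python) =====
-- def get_syn_list_from_line(line):
--     s = line.strip(" -")
--     dot = s.find(".")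
--     if dot != -1:
--         s = s[:dot]
--     return [w.strip().upper() for w in s.split(";") if w.strip()]
-- ===== Notes on version B (the rewrite author's own statement) =====
-- stated objective: simpler
-- what changed: B replaces A's single loop with inline period-detection and break by an up-front truncation of the whole stripped line at its first period followed by one uniform strip/filter/upper comprehension over the semicolon pieces.
import Mathlib
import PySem

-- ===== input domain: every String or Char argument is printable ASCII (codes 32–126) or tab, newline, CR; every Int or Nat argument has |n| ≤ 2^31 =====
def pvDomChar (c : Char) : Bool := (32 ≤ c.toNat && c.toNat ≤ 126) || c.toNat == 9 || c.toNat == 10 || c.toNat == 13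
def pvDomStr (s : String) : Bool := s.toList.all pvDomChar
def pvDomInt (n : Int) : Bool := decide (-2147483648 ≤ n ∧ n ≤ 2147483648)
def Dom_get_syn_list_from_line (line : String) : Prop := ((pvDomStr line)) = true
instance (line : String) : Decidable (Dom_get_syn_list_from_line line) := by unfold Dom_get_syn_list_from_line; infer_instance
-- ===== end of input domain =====

-- B replaces A's token loop with inline period-check and break by an up-front truncation of the
-- stripped line at its first period followed by one uniform strip/filter/upper pass (same values everywhere).

-- ===== PORT A =====
-- A's for-loop over the ';'-tokens, with continue/break, as structural recursion
def pvALoop : List String → List String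
  | [] => []
  | w0 :: rest =>
    let w := PySem.Str.strip w0
    if w = "" then pvALoop rest
    else
      let idx := PySem.Str.find w "."
      if idx = -1 then PySem.Str.upper (PySem.Str.strip w) :: pvALoop rest
      else
        let left := PySem.Str.upper (PySem.Str.strip (PySem.Str.slice w none (some idx)))
        if left = "" then [] else [left]

def get_syn_list_from_line (line : String) : List String :=
  pvALoop ((PySem.Str.split? (PySem.Str.stripChars line " -") ";").getD [])

-- ===== PORT B =====
def get_syn_list_from_line_alt (line : String) : List String :=
  let s0 := PySem.Str.stripChars line " -"
  let dot := PySem.Str.find s0 "."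
  let s := if dot ≠ -1 then PySem.Str.slice s0 none (some dot) else s0
  ((PySem.Str.split? s ";").getD []).filterMap (fun w =>
    let t := PySem.Str.strip w
    if t = "" then none else some (PySem.Str.upper t))

-- ===== PRECONDITION & SPEC =====
def Spec_get_syn_list_from_line (line : String) (out : List String) : Prop := out = get_syn_list_from_line_alt line
instance (line : String) (out : List String) : Decidable (Spec_get_syn_list_from_line line out) := by unfold Spec_get_syn_list_from_line; infer_instance

-- ===== CLAIM (what is proved, stated in full; the proofs are below) =====
def Claim_equal_get_syn_list_from_line : Prop := ∀ (line : String), Dom_get_syn_list_from_line line → Spec_get_syn_list_from_line line (get_syn_list_from_line line)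

-- ===== LEMMAS AND PROOFS =====

def pvSp : List Char → List Char × List (List Char)
  | [] => ([], [])
  | a :: s =>
    let ht := pvSp s
    if a = ';' then ([], ht.1 :: ht.2) else (a :: ht.1, ht.2)

lemma pv_go_inv (fuel : Nat) : ∀ (l cur acc : _),
    l.length ≤ fuel →
    PySem.Chars.splitOn.go [';'] fuel l cur acc
      = acc.reverse ++ (cur.reverse ++ (pvSp l).1) :: (pvSp l).2 := by
  induction fuel with
  | zero =>
    intro l cur acc h
    have : l = [] := by cases l <;> simp_all
    subst this
    simp [PySem.Chars.splitOn.go, pvSp]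
  | succ n ih =>
    intro l cur acc h
    cases l with
    | nil => simp [PySem.Chars.splitOn.go, pvSp]
    | cons a rest =>
      by_cases ha : a = ';'
      · subst ha
        rw [PySem.Chars.splitOn.go]
        simp only [List.isPrefixOf]
        rw [ih] <;> simp_all [pvSp]
      · rw [PySem.Chars.splitOn.go]
        have : List.isPrefixOf [';'] (a :: rest) = false := by
          simp [List.isPrefixOf]; exact fun h => absurd h.symm ha
        rw [this]
        simp only [Bool.false_eq_true, if_false]
        rw [ih _ _ _ (by simpa using Nat.le_of_succ_le_succ h)]
        simp [pvSp, ha]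

def pvToks (s : List Char) : List (List Char) := (pvSp s).1 :: (pvSp s).2

lemma pv_splitOn_eq (s : List Char) : PySem.Chars.splitOn s [';'] = pvToks s := by
  rw [PySem.Chars.splitOn, pv_go_inv _ _ _ _ (Nat.le_succ _)]
  simp [pvToks]

lemma pv_rstrip_cons {a : Char} (ha : PySem.Chars.isspace a = false) (u : List Char) :
    PySem.Chars.rstrip (a :: u) = a :: PySem.Chars.rstrip u := by
  simp only [PySem.Chars.rstrip, List.reverse_cons, List.dropWhile_append]
  split
  · next h =>
    rw [List.isEmpty_iff] at h
    simp [List.dropWhile_cons, ha, h]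
  · simp [List.dropWhile_cons, ha]

lemma pv_lstrip_rstrip (x : List Char) (hx : PySem.Chars.lstrip x = x) :
    PySem.Chars.lstrip (PySem.Chars.rstrip x) = PySem.Chars.rstrip x := by
  cases x with
  | nil => simp [PySem.Chars.lstrip, PySem.Chars.rstrip]
  | cons a u =>
    have ha : PySem.Chars.isspace a = false := by
      by_contra h
      rw [Bool.not_eq_false] at h
      rw [PySem.Chars.lstrip, List.dropWhile_cons, if_pos h] at hx
      have := congrArg List.length hx
      simp at this
      have := List.length_dropWhile_le PySem.Chars.isspace u
      omega
    rw [pv_rstrip_cons ha]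
    simp [PySem.Chars.lstrip, List.dropWhile_cons, ha]

lemma pv_rstrip_idem (y : List Char) :
    PySem.Chars.rstrip (PySem.Chars.rstrip y) = PySem.Chars.rstrip y := by
  simp [PySem.Chars.rstrip, List.dropWhile_idempotent]

lemma pv_strip_idem (t : List Char) :
    PySem.Chars.strip (PySem.Chars.strip t) = PySem.Chars.strip t := by
  have hx : PySem.Chars.lstrip (PySem.Chars.lstrip t) = PySem.Chars.lstrip t := by
    simp [PySem.Chars.lstrip, List.dropWhile_idempotent]
  rw [PySem.Chars.strip, PySem.Chars.strip, pv_lstrip_rstrip _ hx, pv_rstrip_idem]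

lemma pv_lstrip_mem {c : Char} (hc : PySem.Chars.isspace c = false) (t : List Char) :
    c ∈ PySem.Chars.lstrip t ↔ c ∈ t := by
  constructor
  · exact fun h => (List.dropWhile_sublist _).mem h
  · intro h
    rw [← List.takeWhile_append_dropWhile (p := PySem.Chars.isspace) (l := t), List.mem_append] at h
    rcases h with h | h
    · exact absurd (List.mem_takeWhile_imp h) (by simp [hc])
    · exact h

lemma pv_rstrip_mem {c : Char} (hc : PySem.Chars.isspace c = false) (t : List Char) :
    c ∈ PySem.Chars.rstrip t ↔ c ∈ t := by
  rw [PySem.Chars.rstrip, List.mem_reverse]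
  have := pv_lstrip_mem hc t.reverse
  rw [PySem.Chars.lstrip] at this
  rw [this, List.mem_reverse]

lemma pv_strip_mem {c : Char} (hc : PySem.Chars.isspace c = false) (t : List Char) :
    c ∈ PySem.Chars.strip t ↔ c ∈ t := by
  rw [PySem.Chars.strip, pv_rstrip_mem hc, pv_lstrip_mem hc]

lemma pv_find_neg (w : List Char) : PySem.Chars.find w ['.'] = -1 ↔ '.' ∉ w := by
  rw [PySem.Chars.find_eq_neg_one_iff, List.singleton_infix_iff]

lemma pv_take_eq_takeWhile (c : Char) : ∀ (w : List Char) (n : Nat),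
    (∀ j < n, w[j]? ≠ some c) → w[n]? = some c → w.take n = w.takeWhile (· ≠ c) := by
  intro w
  induction w with
  | nil => intro n _ h; simp at h
  | cons a w' ih =>
    intro n h0 hn
    cases n with
    | zero =>
      simp at hn
      simp [hn, List.takeWhile_cons]
    | succ m =>
      have ha : a ≠ c := by
        have := h0 0 (Nat.succ_pos m)
        simpa using this
      simp only [List.take_succ_cons, List.takeWhile_cons, ha, decide_true, if_pos]
      rw [ih m (fun j hj => by simpa using h0 (j+1) (by omega)) (by simpa using hn)]
      simp [ha]

lemma pv_singleton_prefix (c : Char) (l : List Char) : ([c] <+: l) ↔ l.head? = some c := by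
  cases l with
  | nil => simp
  | cons a t => simp [List.cons_prefix_cons, eq_comm]

lemma pv_take_find (w : List Char) (h : PySem.Chars.find w ['.'] ≠ -1) :
    w.take (PySem.Chars.find w ['.']).toNat = w.takeWhile (· ≠ '.') := by
  have h0 : 0 ≤ PySem.Chars.find w ['.'] := by
    have := PySem.Chars.neg_one_le_find (s := w) (sub := ['.'])
    omega
  obtain ⟨h1, h2⟩ := PySem.Chars.find_spec h0
  apply pv_take_eq_takeWhile
  · intro j hj
    have := h2 j hj
    rw [pv_singleton_prefix, List.head?_drop] at this
    exact this
  · rw [pv_singleton_prefix, List.head?_drop] at h1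
    exact h1

lemma pv_space_ne_dot {a : Char} (ha : PySem.Chars.isspace a = true) : (decide (a ≠ '.')) = true := by
  have : a ≠ '.' := by
    intro h; subst h; simp [PySem.Chars.isspace] at ha
  simp [this]

lemma pv_strip_space_prefix (w y : List Char) (hw : ∀ a ∈ w, PySem.Chars.isspace a = true) :
    PySem.Chars.strip (w ++ y) = PySem.Chars.strip y := by
  rw [PySem.Chars.strip, PySem.Chars.strip, PySem.Chars.lstrip, PySem.Chars.lstrip,
    List.dropWhile_append_of_pos hw]

lemma pv_star (t : List Char) :
    PySem.Chars.strip ((PySem.Chars.strip t).takeWhile (· ≠ '.'))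
      = PySem.Chars.strip (t.takeWhile (· ≠ '.')) := by
  set x := PySem.Chars.lstrip t with hxdef
  have hx : PySem.Chars.lstrip x = x := by
    simp [hxdef, PySem.Chars.lstrip, List.dropWhile_idempotent]
  have htw : ∀ a ∈ List.takeWhile PySem.Chars.isspace t, PySem.Chars.isspace a = true :=
    fun a ha => List.mem_takeWhile_imp ha
  have step1 : PySem.Chars.strip (t.takeWhile (· ≠ '.'))
      = PySem.Chars.strip (x.takeWhile (· ≠ '.')) := by
    conv_lhs => rw [← List.takeWhile_append_dropWhile (p := PySem.Chars.isspace) (l := t)]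
    rw [List.takeWhile_append_of_pos (fun a ha => pv_space_ne_dot (htw a ha))]
    exact pv_strip_space_prefix _ _ htw
  have hdecomp : PySem.Chars.rstrip x ++ (List.takeWhile PySem.Chars.isspace x.reverse).reverse = x := by
    rw [PySem.Chars.rstrip, ← List.reverse_append]
    conv_rhs => rw [← List.reverse_reverse x,
      ← List.takeWhile_append_dropWhile (p := PySem.Chars.isspace) (l := x.reverse)]
  have hz : ∀ a ∈ (List.takeWhile PySem.Chars.isspace x.reverse).reverse, PySem.Chars.isspace a = true := by
    intro a ha; exact List.mem_takeWhile_imp (List.mem_reverse.mp ha)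
  have step2 : PySem.Chars.strip (x.takeWhile (· ≠ '.'))
      = PySem.Chars.strip ((PySem.Chars.rstrip x).takeWhile (· ≠ '.')) := by
    by_cases hdot : '.' ∈ PySem.Chars.rstrip x
    · have hne : (List.takeWhile (· ≠ '.') (PySem.Chars.rstrip x)).length ≠ (PySem.Chars.rstrip x).length := by
        intro hlen
        have heq : List.takeWhile (· ≠ '.') (PySem.Chars.rstrip x) = PySem.Chars.rstrip x :=
          (List.takeWhile_prefix _).eq_of_length hlen
        have := List.takeWhile_eq_self_iff.mp heq '.' hdot
        simp at this
      conv_lhs => rw [← hdecomp, List.takeWhile_append, if_neg hne]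
    · have hnx : '.' ∉ x := by
        intro hmem
        rw [← hdecomp, List.mem_append] at hmem
        rcases hmem with h | h
        · exact hdot h
        · have := hz _ h
          simp [PySem.Chars.isspace] at this
      rw [List.takeWhile_eq_self_iff.mpr (fun a ha => by simp; rintro rfl; exact hnx ha),
        List.takeWhile_eq_self_iff.mpr (fun a ha => by simp; rintro rfl; exact hdot ha)]
      show PySem.Chars.strip x = PySem.Chars.strip (PySem.Chars.rstrip x)
      rw [PySem.Chars.strip, PySem.Chars.strip, hx, pv_lstrip_rstrip x hx, pv_rstrip_idem]
  have hst : PySem.Chars.strip t = PySem.Chars.rstrip x := by rw [PySem.Chars.strip, hxdef]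
  rw [hst, step1, step2]

lemma pv_tok_subset (c : Char) (s : List Char) :
    (c ∈ (pvSp s).1 → c ∈ s) ∧ (∀ t ∈ (pvSp s).2, c ∈ t → c ∈ s) := by
  induction s with
  | nil => simp [pvSp]
  | cons a s ih =>
    by_cases ha : a = ';' <;>
      simp only [pvSp, ha, if_pos, if_neg, reduceIte] <;>
      constructor
    · simp
    · intro t ht hc
      simp only [List.mem_cons] at ht
      rcases ht with rfl | ht
      · exact List.mem_cons_of_mem _ (ih.1 hc)
      · exact List.mem_cons_of_mem _ (ih.2 t ht hc)
    · intro h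
      rcases List.mem_cons.mp h with rfl | h
      · exact List.mem_cons_self
      · exact List.mem_cons_of_mem _ (ih.1 h)
    · intro t ht hc
      exact List.mem_cons_of_mem _ (ih.2 t ht hc)

def pvTrunc : List (List Char) → List (List Char)
  | [] => []
  | t :: ts => if '.' ∈ t then [t.takeWhile (· ≠ '.')] else t :: pvTrunc ts

lemma pv_trunc_id (ts : List (List Char)) (h : ∀ t ∈ ts, '.' ∉ t) : pvTrunc ts = ts := by
  induction ts with
  | nil => rfl
  | cons t ts ih =>
    rw [pvTrunc, if_neg (h t List.mem_cons_self), ih (fun u hu => h u (List.mem_cons_of_mem _ hu))]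

lemma pvTrunc_cons_mem {t : List Char} (ts : List (List Char)) (h : '.' ∈ t) :
    pvTrunc (t :: ts) = [t.takeWhile (· ≠ '.')] := by
  simp only [pvTrunc, if_pos h]

lemma pvTrunc_cons_not {t : List Char} (ts : List (List Char)) (h : '.' ∉ t) :
    pvTrunc (t :: ts) = t :: pvTrunc ts := by
  simp only [pvTrunc, if_neg h]

lemma pv_S' (v : List Char) : ∀ (u : List Char), '.' ∉ u →
    pvTrunc (pvToks (u ++ '.' :: v)) = pvToks u := by
  intro u
  induction u with
  | nil =>
    intro _
    have hds : ('.' : Char) ≠ ';' := by decide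
    simp only [List.nil_append, pvToks, pvSp, if_neg hds]
    rw [pvTrunc_cons_mem _ List.mem_cons_self]
    simp [List.takeWhile_cons]
  | cons a u ih =>
    intro hu
    have ha : a ≠ '.' := fun h => hu (h ▸ List.mem_cons_self)
    have hu' : '.' ∉ u := fun h => hu (List.mem_cons_of_mem _ h)
    have IH := ih hu'
    by_cases hsemi : a = ';'
    · subst hsemi
      simp only [pvToks, pvSp, List.cons_append, if_pos] at *
      rw [pvTrunc_cons_not _ List.not_mem_nil, IH]
    · simp only [pvToks, pvSp, List.cons_append, if_neg hsemi] at *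
      by_cases hdot : '.' ∈ (pvSp (u ++ '.' :: v)).1
      · rw [pvTrunc_cons_mem _ hdot] at IH
        rw [pvTrunc_cons_mem _ (List.mem_cons_of_mem _ hdot)]
        rw [List.takeWhile_cons, if_pos (by simpa using ha)]
        obtain ⟨h1, h2⟩ := List.cons_eq_cons.mp IH
        rw [h1, ← h2]
      · rw [pvTrunc_cons_not _ hdot] at IH
        have hnm : '.' ∉ a :: (pvSp (u ++ '.' :: v)).1 := by
          intro hmem
          rcases List.mem_cons.mp hmem with h | h
          · exact ha h.symm
          · exact hdot h
        rw [pvTrunc_cons_not _ hnm]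
        obtain ⟨h1, h2⟩ := List.cons_eq_cons.mp IH
        rw [h1, h2]

def pvAC : List (List Char) → List (List Char)
  | [] => []
  | t :: ts =>
    let w := PySem.Chars.strip t
    if w = [] then pvAC ts
    else
      let idx := PySem.Chars.find w ['.']
      if idx = -1 then PySem.Chars.upper (PySem.Chars.strip w) :: pvAC ts
      else
        let left := PySem.Chars.upper (PySem.Chars.strip (PySem.List.slice w none (some idx)))
        if left = [] then [] else [left]

def pvBTok (w : List Char) : Option (List Char) :=
  let t := PySem.Chars.strip w
  if t = [] then none else some (PySem.Chars.upper t)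

lemma pv_isspace_dot : PySem.Chars.isspace '.' = false := by decide

lemma pv_T (ts : List (List Char)) : pvAC ts = (pvTrunc ts).filterMap pvBTok := by
  induction ts with
  | nil => rfl
  | cons t ts ih =>
    by_cases hw : PySem.Chars.strip t = []
    · have hnd : '.' ∉ t := by
        intro h
        have := (pv_strip_mem pv_isspace_dot t).mpr h
        rw [hw] at this
        simp at this
      rw [pvTrunc_cons_not _ hnd]
      simp only [pvAC, hw, if_pos, List.filterMap_cons, pvBTok, reduceIte, ih]
    · by_cases hidx : PySem.Chars.find (PySem.Chars.strip t) ['.'] = -1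
      · have hnd : '.' ∉ t := by
          intro h
          exact (pv_find_neg _).mp hidx ((pv_strip_mem pv_isspace_dot t).mpr h)
        rw [pvTrunc_cons_not _ hnd]
        simp only [pvAC, hw, hidx, if_neg, reduceIte, List.filterMap_cons, pvBTok, hw, pv_strip_idem, ih]
      · have hd : '.' ∈ t := by
          have : '.' ∈ PySem.Chars.strip t := by
            by_contra h
            exact hidx ((pv_find_neg _).mpr h)
          exact (pv_strip_mem pv_isspace_dot t).mp this
        rw [pvTrunc_cons_mem _ hd]
        have h0 : 0 ≤ PySem.Chars.find (PySem.Chars.strip t) ['.'] := by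
          have := PySem.Chars.neg_one_le_find (s := PySem.Chars.strip t) (sub := ['.'])
          omega
        have hsl : PySem.List.slice (PySem.Chars.strip t) none
            (some (PySem.Chars.find (PySem.Chars.strip t) ['.']))
            = (PySem.Chars.strip t).takeWhile (· ≠ '.') := by
          rw [PySem.List.slice_to _ h0, pv_take_find _ hidx]
        simp only [pvAC, hw, hidx, if_neg, reduceIte, hsl, pv_star, List.filterMap_cons, pvBTok]
        by_cases hleft : PySem.Chars.strip (List.takeWhile (fun x => !decide (x = '.')) t) = [] <;>
          simp [hleft, PySem.Chars.upper]

lemma pv_main (s : List Char) :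
    pvAC (pvToks s) = (pvToks (s.takeWhile (· ≠ '.'))).filterMap pvBTok := by
  rw [pv_T]
  by_cases h : '.' ∈ s
  · have hdw : List.dropWhile (· ≠ '.') s ≠ [] := by
      rw [Ne, List.dropWhile_eq_nil_iff]
      push_neg
      exact ⟨'.', h, by simp⟩
    obtain ⟨b, v, hbv⟩ := List.exists_cons_of_ne_nil hdw
    have hb : b = '.' := by
      have h1 := List.head_dropWhile_not (· ≠ '.') hdw
      have h4 : (List.dropWhile (· ≠ '.') s).head? = some b := by rw [hbv]; rfl
      have h5 : (List.dropWhile (· ≠ '.') s).head? = some ((List.dropWhile (· ≠ '.') s).head hdw) :=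
        List.head?_eq_head hdw
      have h3 : (List.dropWhile (· ≠ '.') s).head hdw = b := Option.some.inj (h5.symm.trans h4)
      rw [h3] at h1
      simpa using h1
    have hdecomp : s = s.takeWhile (· ≠ '.') ++ '.' :: v := by
      conv_lhs => rw [← List.takeWhile_append_dropWhile (p := (· ≠ '.')) (l := s), hbv, hb]
    have hnu : '.' ∉ s.takeWhile (· ≠ '.') := by
      intro hm
      have := List.mem_takeWhile_imp hm
      simp at this
    conv_lhs => rw [hdecomp, pv_S' v _ hnu]
  · have hts : s.takeWhile (· ≠ '.') = s :=
      List.takeWhile_eq_self_iff.mpr (fun a ha => by simp; rintro rfl; exact h ha)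
    rw [hts, pv_trunc_id]
    intro t ht
    intro hc
    rcases List.mem_cons.mp ht with rfl | ht'
    · exact h ((pv_tok_subset '.' s).1 hc)
    · exact h ((pv_tok_subset '.' s).2 t ht' hc)

lemma pv_toList_inj {a b : String} (h : a.toList = b.toList) : a = b := by
  rw [← String.ofList_toList (s := a), ← String.ofList_toList (s := b), h]

lemma pv_strip_of (cs : List Char) :
    PySem.Str.strip (String.ofList cs) = String.ofList (PySem.Chars.strip cs) := by
  apply pv_toList_inj
  simp

lemma pv_upper_of (cs : List Char) :
    PySem.Str.upper (String.ofList cs) = String.ofList (PySem.Chars.upper cs) := by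
  apply pv_toList_inj
  simp

lemma pv_slice_of (cs : List Char) (i : Int) :
    PySem.Str.slice (String.ofList cs) none (some i) = String.ofList (PySem.List.slice cs none (some i)) := by
  apply pv_toList_inj
  simp

lemma pv_find_of (cs : List Char) :
    PySem.Str.find (String.ofList cs) "." = PySem.Chars.find cs ['.'] := by
  simp

lemma pv_ofList_empty (x : List Char) : (String.ofList x = "") ↔ x = [] := by
  constructor
  · intro h
    have := congrArg String.toList h
    simpa using this
  · rintro rfl
    rfl

lemma pv_split_getD (s : String) :
    (PySem.Str.split? s ";").getD [] = (pvToks s.toList).map String.ofList := by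
  have hmap := PySem.Str.split?_map s ";"
  have hsep : (";" : String).toList = [';'] := rfl
  rw [hsep, PySem.Chars.split?] at hmap
  simp only [List.isEmpty_cons, Bool.false_eq_true, if_false, reduceIte] at hmap
  rw [pv_splitOn_eq] at hmap
  cases hs : PySem.Str.split? s ";" with
  | none => rw [hs] at hmap; simp at hmap
  | some l =>
    rw [hs] at hmap
    simp only [Option.map_some, Option.some.injEq] at hmap
    have : l = (pvToks s.toList).map String.ofList := by
      rw [← hmap, List.map_map]
      have : String.ofList ∘ String.toList = id := by
        funext z; exact String.ofList_toList (s := z)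
      rw [this, List.map_id]
    simp [this]

lemma pv_aLoop_map (css : List (List Char)) :
    pvALoop (css.map String.ofList) = (pvAC css).map String.ofList := by
  induction css with
  | nil => rfl
  | cons t ts ih =>
    simp only [List.map_cons, pvALoop, pvAC, pv_strip_of, pv_ofList_empty, pv_find_of,
      pv_slice_of, pv_upper_of, ih]
    split_ifs <;> simp

lemma pv_filterMap_of (css : List (List Char)) :
    (css.map String.ofList).filterMap (fun w =>
      let t := PySem.Str.strip w
      if t = "" then none else some (PySem.Str.upper t))
    = (css.filterMap pvBTok).map String.ofList := by
  induction css with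
  | nil => rfl
  | cons t ts ih =>
    simp only [List.map_cons, List.filterMap_cons, pv_strip_of, pv_ofList_empty, pv_upper_of,
      pvBTok, ih]
    split_ifs <;> simp

theorem pv_final (line : String) : get_syn_list_from_line line = get_syn_list_from_line_alt line := by
  rw [get_syn_list_from_line, get_syn_list_from_line_alt]
  set s0 := PySem.Str.stripChars line " -" with hs0
  have hdot : PySem.Str.find s0 "." = PySem.Chars.find s0.toList ['.'] := by
    rw [← String.ofList_toList (s := s0), pv_find_of, String.ofList_toList]
  have hcut : (if PySem.Str.find s0 "." ≠ -1
        then PySem.Str.slice s0 none (some (PySem.Str.find s0 "."))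
        else s0).toList = s0.toList.takeWhile (· ≠ '.') := by
    by_cases h : PySem.Str.find s0 "." = -1
    · rw [if_neg (by simpa using h)]
      have : '.' ∉ s0.toList := (pv_find_neg _).mp (by rw [← hdot]; exact h)
      exact (List.takeWhile_eq_self_iff.mpr (fun a ha => by
        simp; rintro rfl; exact this ha)).symm
    · rw [if_pos h]
      have h' : PySem.Chars.find s0.toList ['.'] ≠ -1 := by rw [← hdot]; exact h
      have h0 : 0 ≤ PySem.Chars.find s0.toList ['.'] := by
        have := PySem.Chars.neg_one_le_find (s := s0.toList) (sub := ['.'])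
        omega
      rw [← String.ofList_toList (s := s0), pv_slice_of]
      simp only [String.toList_ofList]
      rw [String.ofList_toList, hdot, PySem.List.slice_to _ h0, pv_take_find _ h']
  rw [pv_split_getD, pv_split_getD, pv_aLoop_map, pv_filterMap_of, hcut, pv_main]

-- ===== VERDICT (by name: the statement is the Claim_ definition above) =====
theorem get_syn_list_from_line_spec : Claim_equal_get_syn_list_from_line := by
  intro line _
  unfold Spec_get_syn_list_from_line
  exact pv_final line
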